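-- pv_equiv track=rewrite | github.com/onera/standalone-vta | src/compiler/vta_compiler/matrix_partitioning/matrix_partitioning.py | get_operations
-- ===== SOURCE A (Python) =====
-- def euclidian_division(dividend, divisor):
--     """
--     Euclidian division: dividend = divisor * quotient + remainder
--     Inputs:
--         - dividend: (int) the number to decompose
--         - divisor: (int) the modulo
--     Outputs:
--         - quotient: (int) result of dividend // divisor
--         - remainder: (int) result of dividenc % divisor
--     """
--     return dividend // divisor, dividend % divisor
--
-- def get_operations(load_A, load_B, A_blocks_col, B_blocks_col, C_blocks_col):
--     """
--     Generates the list of GeMM operations for a given set of loaded A and B blocks.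
--     An operation is valid if a block A[i, k] and a block B[k, j] are both loaded.
--     The result is accumulated in C[i, j].
--     """
--     operations = []
--     # Create a lookup for B blocks for faster access: map row_k to list of (col_j, B_idx)
--     b_lookup = {}
--     for b_idx in load_B:
--         k, j = euclidian_division(b_idx, B_blocks_col)
--         if k not in b_lookup:
--             b_lookup[k] = []
--         b_lookup[k].append((j, b_idx))
--
--     # Iterate through loaded A blocks
--     for a_idx in load_A:
--         i, k = euclidian_division(a_idx, A_blocks_col)
--
--         # Check if there are any B blocks with a matching row index 'k'
--         if k in b_lookup:
--             # For each matching B block, create a GeMM operation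
--             for j, b_idx in b_lookup[k]:
--                 c_idx = i * C_blocks_col + j
--                 operations.append(("GeMM", c_idx, a_idx, b_idx))
--
--     return operations
-- ===== SOURCE B (Python) =====
-- def euclidian_division(dividend, divisor):
--     return dividend // divisor, dividend % divisor
--
-- def get_operations(load_A, load_B, A_blocks_col, B_blocks_col, C_blocks_col):
--     """Naive direct scan: for each loaded A block, rescan load_B for matching
--     row index -- no b_lookup index is built."""
--     operations = []
--     for a_idx in load_A:
--         i, k = euclidian_division(a_idx, A_blocks_col)
--         for b_idx in load_B:
--             kk, j = euclidian_division(b_idx, B_blocks_col)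
--             if kk == k:
--                 operations.append(("GeMM", i * C_blocks_col + j, a_idx, b_idx))
--     return operations
-- ===== Notes on version B (the rewrite author's own statement) =====
-- stated objective: simpler
-- what changed: B drops A's grouped b_lookup dictionary entirely and instead rescans load_B for each loaded A block, matching row indices directly in a nested loop; since load_B is scanned in its original order the emitted operations are identical.
import Mathlib
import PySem

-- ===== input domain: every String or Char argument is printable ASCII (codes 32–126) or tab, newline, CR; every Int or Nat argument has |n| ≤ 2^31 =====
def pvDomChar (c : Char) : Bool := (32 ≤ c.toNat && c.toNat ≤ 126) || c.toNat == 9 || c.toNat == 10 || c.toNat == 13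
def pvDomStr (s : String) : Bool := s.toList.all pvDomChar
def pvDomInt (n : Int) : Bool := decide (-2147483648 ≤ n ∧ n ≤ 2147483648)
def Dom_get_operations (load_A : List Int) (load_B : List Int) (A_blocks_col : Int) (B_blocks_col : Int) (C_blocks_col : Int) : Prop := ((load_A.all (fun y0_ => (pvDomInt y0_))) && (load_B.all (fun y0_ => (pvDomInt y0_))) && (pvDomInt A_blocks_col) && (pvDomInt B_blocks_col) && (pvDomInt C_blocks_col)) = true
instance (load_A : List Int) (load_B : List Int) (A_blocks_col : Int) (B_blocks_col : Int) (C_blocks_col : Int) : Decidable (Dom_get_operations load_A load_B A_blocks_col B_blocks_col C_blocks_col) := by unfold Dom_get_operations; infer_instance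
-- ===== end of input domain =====

-- B replaces A's grouped b_lookup dictionary by a direct nested rescan of load_B
-- for each loaded A block (simpler, same output order).


-- ===== PORT A =====
def get_operations (load_A : List Int) (load_B : List Int) (A_blocks_col : Int) (B_blocks_col : Int) (C_blocks_col : Int) : List (String × Int × Int × Int) :=
  -- b_lookup = {}; for b_idx in load_B: k, j = divmod-style; if k not in b_lookup: b_lookup[k] = []; b_lookup[k].append((j, b_idx))
  let b_lookup : PySem.Dict Int (List (Int × Int)) :=
    load_B.foldl (fun d b_idx =>
      let k := PySem.Int.floordiv b_idx B_blocks_col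
      let j := PySem.Int.mod b_idx B_blocks_col
      let d := if d.contains k then d else d.insert k ([] : List (Int × Int))
      d.modify k [] (fun l => l ++ [(j, b_idx)])) PySem.Dict.empty
  load_A.foldl (fun operations a_idx =>
    let i := PySem.Int.floordiv a_idx A_blocks_col
    let k := PySem.Int.mod a_idx A_blocks_col
    if b_lookup.contains k then
      (b_lookup.getD k []).foldl (fun operations p =>
        operations ++ [("GeMM", i * C_blocks_col + p.1, a_idx, p.2)]) operations
    else operations) []

-- ===== PORT B =====
def get_operations_alt (load_A : List Int) (load_B : List Int) (A_blocks_col : Int) (B_blocks_col : Int) (C_blocks_col : Int) : List (String × Int × Int × Int) :=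
  load_A.foldl (fun operations a_idx =>
    let i := PySem.Int.floordiv a_idx A_blocks_col
    let k := PySem.Int.mod a_idx A_blocks_col
    load_B.foldl (fun operations b_idx =>
      let kk := PySem.Int.floordiv b_idx B_blocks_col
      let j := PySem.Int.mod b_idx B_blocks_col
      if kk == k then operations ++ [("GeMM", i * C_blocks_col + j, a_idx, b_idx)]
      else operations) operations) []

-- ===== PRECONDITION & SPEC =====
-- Pre_ excludes exactly the inputs where A raises ZeroDivisionError: a nonempty
-- load_B with B_blocks_col = 0, or a nonempty load_A with A_blocks_col = 0.
def Pre_get_operations (load_A : List Int) (load_B : List Int) (A_blocks_col : Int) (B_blocks_col : Int) (C_blocks_col : Int) : Prop :=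
  (load_B ≠ [] → B_blocks_col ≠ 0) ∧ (load_A ≠ [] → A_blocks_col ≠ 0)
instance (load_A : List Int) (load_B : List Int) (A_blocks_col : Int) (B_blocks_col : Int) (C_blocks_col : Int) : Decidable (Pre_get_operations load_A load_B A_blocks_col B_blocks_col C_blocks_col) := by unfold Pre_get_operations; infer_instance
def pvWitness_get_operations : List Int × List Int × Int × Int × Int := ([1, 2, 5], [3, 4], 2, 2, 3)

def Spec_get_operations (load_A : List Int) (load_B : List Int) (A_blocks_col : Int) (B_blocks_col : Int) (C_blocks_col : Int) (out : List (String × Int × Int × Int)) : Prop := out = get_operations_alt load_A load_B A_blocks_col B_blocks_col C_blocks_col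
instance (load_A : List Int) (load_B : List Int) (A_blocks_col : Int) (B_blocks_col : Int) (C_blocks_col : Int) (out : List (String × Int × Int × Int)) : Decidable (Spec_get_operations load_A load_B A_blocks_col B_blocks_col C_blocks_col out) := by unfold Spec_get_operations; infer_instance

-- ===== CLAIM (what is proved, stated in full; the proofs are below) =====
def Claim_equal_get_operations : Prop := ∀ (load_A : List Int) (load_B : List Int) (A_blocks_col : Int) (B_blocks_col : Int) (C_blocks_col : Int), Dom_get_operations load_A load_B A_blocks_col B_blocks_col C_blocks_col → Pre_get_operations load_A load_B A_blocks_col B_blocks_col C_blocks_col → Spec_get_operations load_A load_B A_blocks_col B_blocks_col C_blocks_col (get_operations load_A load_B A_blocks_col B_blocks_col C_blocks_col)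

-- ===== LEMMAS AND PROOFS =====

-- A's "ensure key, then append" step is the plain modify-with-default step.
theorem setdefault_modify_step {ν : Type} (d : PySem.Dict Int (List ν)) (k : Int) (f : List ν → List ν) :
    (if d.contains k then d else d.insert k ([] : List ν)).modify k [] f = d.modify k [] f := by
  by_cases h : d.contains k = true
  · simp [h]
  · simp only [Bool.not_eq_true] at h
    rw [if_neg (by simp [h])]
    simp only [PySem.Dict.modify, PySem.Dict.getD_insert_self,
      PySem.Dict.insert_insert_self, PySem.Dict.getD_of_not_contains d ([] : List ν) h]

-- A's lookup list for key c is exactly the (j, b_idx) pairs of the matching B blocks, in load_B order.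
theorem b_lookup_getD (load_B : List Int) (Bc c : Int) :
    ((load_B.foldl (fun d b_idx =>
        let k := PySem.Int.floordiv b_idx Bc
        let j := PySem.Int.mod b_idx Bc
        let d := if d.contains k then d else d.insert k ([] : List (Int × Int))
        d.modify k [] (fun l => l ++ [(j, b_idx)])) PySem.Dict.empty).getD c [])
      = (load_B.filter (fun b => PySem.Int.floordiv b Bc == c)).map (fun b => (PySem.Int.mod b Bc, b)) := by
  have hstep : (load_B.foldl (fun d b_idx =>
        let k := PySem.Int.floordiv b_idx Bc
        let j := PySem.Int.mod b_idx Bc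
        let d := if d.contains k then d else d.insert k ([] : List (Int × Int))
        d.modify k [] (fun l => l ++ [(j, b_idx)])) PySem.Dict.empty)
      = ((load_B.map (fun b => (PySem.Int.floordiv b Bc, (PySem.Int.mod b Bc, b)))).foldl
          (fun d p => d.modify p.1 [] (fun l => l ++ [p.2])) PySem.Dict.empty) := by
    rw [List.foldl_map]
    congr 1
    funext d b
    exact setdefault_modify_step d _ _
  rw [hstep, PySem.Dict.getD_foldl_modify_append]
  simp [List.filter_map, Function.comp_def]

theorem get_operations_eq_alt (load_A load_B : List Int) (Ac Bc Cc : Int) :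
    get_operations load_A load_B Ac Bc Cc = get_operations_alt load_A load_B Ac Bc Cc := by
  unfold get_operations get_operations_alt
  dsimp only
  congr 1
  funext ops a
  set k := PySem.Int.mod a Ac with hk
  set i := PySem.Int.floordiv a Ac with hi
  rw [PySem.List.foldl_append_if (fun b => PySem.Int.floordiv b Bc == k)
        (fun b => ("GeMM", i * Cc + PySem.Int.mod b Bc, a, b)) load_B ops]
  by_cases h : (load_B.foldl (fun d b_idx =>
      let kk := PySem.Int.floordiv b_idx Bc
      let j := PySem.Int.mod b_idx Bc
      let d := if d.contains kk then d else d.insert kk ([] : List (Int × Int))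
      d.modify kk [] (fun l => l ++ [(j, b_idx)])) PySem.Dict.empty).contains k = true
  · rw [if_pos h, PySem.List.foldl_append_singleton_eq_map, b_lookup_getD, List.map_map]
    simp [Function.comp_def]
  · simp only [Bool.not_eq_true] at h
    rw [if_neg (by simp [h])]
    have := PySem.Dict.getD_of_not_contains _ ([] : List (Int × Int)) h
    rw [b_lookup_getD load_B Bc k] at this
    simp [List.map_eq_nil_iff.mp this]

-- ===== VERDICT (by name: the statement is the Claim_ definition above) =====
theorem get_operations_spec : Claim_equal_get_operations := by
  intro la lb Ac Bc Cc _ _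
  unfold Spec_get_operations
  exact get_operations_eq_alt la lb Ac Bc Cc
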